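-- pv_equiv track=rewrite | github.com/RLapplications/A3C | New_A3C.py | NewCreateStates
-- ===== SOURCE A (Python) =====
-- import itertools
--
-- def NewCreateStates(LT_f,LT_s,Inv_Max,Inv_Min,O_f,O_s):
--     Temp = []
--     total_pipe = []
--     total_pipe.append(range(Inv_Min,Inv_Max+1))
--     for i in range(1,LT_f+1):
--         total_pipe.append(range(O_f+O_s+1))
--     for i in range(LT_f+1,LT_s):
--         total_pipe.append(range(O_s+1))
--     for index,i in enumerate(itertools.product(*total_pipe)):
--         Temp.append(list(i))
--         Temp[index].append(0)
--     return Temp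
-- ===== SOURCE B (Python) =====
-- def _decode(j, sizes, Inv_Min):
--     # mixed-radix decode of row index j: digits back-to-front via divmod
--     rev = [0]
--     q = j
--     for s in reversed(sizes[1:]):
--         q, d = divmod(q, s)
--         rev.append(d)
--     rev.append(q + Inv_Min)
--     rev.reverse()
--     return rev
--
-- def NewCreateStates(LT_f, LT_s, Inv_Max, Inv_Min, O_f, O_s):
--     sizes = [max(0, Inv_Max + 1 - Inv_Min)]
--     sizes.extend([max(0, O_f + O_s + 1)] * max(0, LT_f))
--     sizes.extend([max(0, O_s + 1)] * max(0, LT_s - LT_f - 1))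
--     n = 1
--     for s in sizes:
--         n *= s
--     return [_decode(j, sizes, Inv_Min) for j in range(n)]
-- ===== Notes on version B (the rewrite author's own statement) =====
-- stated objective: alternative
-- what changed: Replaces itertools.product enumeration of range objects by pure index arithmetic: compute the mixed-radix size vector and the total count n, then reconstruct each row directly from its index j by repeated divmod (mixed-radix decoding), so no range lists or partial product rows are ever materialised.
import Mathlib
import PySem

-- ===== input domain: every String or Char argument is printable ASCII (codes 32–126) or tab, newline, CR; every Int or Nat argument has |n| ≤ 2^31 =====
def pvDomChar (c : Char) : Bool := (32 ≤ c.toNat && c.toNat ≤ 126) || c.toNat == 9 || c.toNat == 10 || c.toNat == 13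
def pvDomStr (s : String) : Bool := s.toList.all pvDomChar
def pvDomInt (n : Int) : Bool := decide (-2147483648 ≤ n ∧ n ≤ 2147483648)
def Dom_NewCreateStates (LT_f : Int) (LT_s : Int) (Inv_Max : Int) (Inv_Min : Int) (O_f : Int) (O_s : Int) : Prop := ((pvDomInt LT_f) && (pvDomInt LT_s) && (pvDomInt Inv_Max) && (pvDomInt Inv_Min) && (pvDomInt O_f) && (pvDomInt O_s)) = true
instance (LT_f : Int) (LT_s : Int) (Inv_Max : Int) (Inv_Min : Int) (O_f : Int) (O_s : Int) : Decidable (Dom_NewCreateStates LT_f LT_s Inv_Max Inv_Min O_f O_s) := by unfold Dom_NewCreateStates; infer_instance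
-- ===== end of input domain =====

-- B replaces itertools.product over range objects by pure index arithmetic:
-- it computes the mixed-radix size vector and total count n, and reconstructs
-- each row from its index j by repeated divmod (mixed-radix decoding).

-- ===== PORT A =====
-- itertools.product(*rs): rows in lexicographic order, last coordinate fastest
def pyProduct : List (List Int) → List (List Int)
  | [] => [[]]
  | r :: rs => r.flatMap (fun x => (pyProduct rs).map (fun t => x :: t))

-- total_pipe = [range(Inv_Min,Inv_Max+1)] + LT_f copies of range(O_f+O_s+1)
--            + (LT_s-LT_f-1) copies of range(O_s+1)
def mkTotalPipe (LT_f : Int) (LT_s : Int) (Inv_Max : Int) (Inv_Min : Int) (O_f : Int) (O_s : Int) : List (List Int) :=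
  [PySem.List.pyRange Inv_Min (Inv_Max + 1) 1]
    ++ (PySem.List.pyRange 1 (LT_f + 1) 1).map (fun _ => PySem.List.pyRange 0 (O_f + O_s + 1) 1)
    ++ (PySem.List.pyRange (LT_f + 1) LT_s 1).map (fun _ => PySem.List.pyRange 0 (O_s + 1) 1)

def NewCreateStates (LT_f : Int) (LT_s : Int) (Inv_Max : Int) (Inv_Min : Int) (O_f : Int) (O_s : Int) : List (List Int) :=
  -- for index,i in enumerate(product): Temp.append(list(i)); Temp[index].append(0)
  (pyProduct (mkTotalPipe LT_f LT_s Inv_Max Inv_Min O_f O_s)).foldl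
    (fun Temp i => Temp ++ [i ++ [0]]) []

-- ===== PORT B =====
-- _decode(j, sizes, Inv_Min): rev = [0]; for s in reversed(sizes[1:]): q,d = divmod(q,s); rev.append(d);
-- rev.append(q + Inv_Min); rev.reverse()
def decodeRow (j : Int) (sizes : List Int) (InvMin : Int) : List Int :=
  let st := (sizes.drop 1).reverse.foldl
    (fun (st : Int × List Int) s => (PySem.Int.floordiv st.1 s, st.2 ++ [PySem.Int.mod st.1 s]))
    (j, [0])
  (st.2 ++ [st.1 + InvMin]).reverse

def NewCreateStates_alt (LT_f : Int) (LT_s : Int) (Inv_Max : Int) (Inv_Min : Int) (O_f : Int) (O_s : Int) : List (List Int) :=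
  let sizes : List Int :=
    (max 0 (Inv_Max + 1 - Inv_Min))
      :: (List.replicate (max 0 LT_f).toNat (max 0 (O_f + O_s + 1))
          ++ List.replicate (max 0 (LT_s - LT_f - 1)).toNat (max 0 (O_s + 1)))
  let n := sizes.foldl (· * ·) 1
  (PySem.List.pyRange 0 n 1).map (fun j => decodeRow j sizes Inv_Min)

-- ===== PRECONDITION & SPEC =====
def Spec_NewCreateStates (LT_f : Int) (LT_s : Int) (Inv_Max : Int) (Inv_Min : Int) (O_f : Int) (O_s : Int) (out : List (List Int)) : Prop := out = NewCreateStates_alt LT_f LT_s Inv_Max Inv_Min O_f O_s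
instance (LT_f : Int) (LT_s : Int) (Inv_Max : Int) (Inv_Min : Int) (O_f : Int) (O_s : Int) (out : List (List Int)) : Decidable (Spec_NewCreateStates LT_f LT_s Inv_Max Inv_Min O_f O_s out) := by unfold Spec_NewCreateStates; infer_instance

-- ===== CLAIM (what is proved, stated in full; the proofs are below) =====
def Claim_equal_NewCreateStates : Prop := ∀ (LT_f : Int) (LT_s : Int) (Inv_Max : Int) (Inv_Min : Int) (O_f : Int) (O_s : Int), Dom_NewCreateStates LT_f LT_s Inv_Max Inv_Min O_f O_s → Spec_NewCreateStates LT_f LT_s Inv_Max Inv_Min O_f O_s (NewCreateStates LT_f LT_s Inv_Max Inv_Min O_f O_s)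

-- ===== LEMMAS AND PROOFS =====

-- structured form of the divmod fold in decodeRow
def dec : List Int → Int → Int × List Int
  | [], j => (j, [])
  | t :: rest, j =>
    let p := dec rest j
    (PySem.Int.floordiv p.1 t, PySem.Int.mod p.1 t :: p.2)

theorem foldl_rev_eq_dec (ts : List Int) (j : Int) (acc : List Int) :
    ts.reverse.foldl
      (fun (st : Int × List Int) s => (PySem.Int.floordiv st.1 s, st.2 ++ [PySem.Int.mod st.1 s]))
      (j, acc)
      = ((dec ts j).1, acc ++ (dec ts j).2.reverse) := by
  induction ts generalizing acc with
  | nil => simp [dec]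
  | cons t rest ih =>
    simp only [List.reverse_cons, List.foldl_append, ih, List.foldl_cons, List.foldl_nil, dec]
    simp

theorem decodeRow_eq (j : Int) (s0 : Int) (ts : List Int) (InvMin : Int) :
    decodeRow j (s0 :: ts) InvMin
      = ((dec ts j).1 + InvMin) :: (dec ts j).2 ++ [0] := by
  unfold decodeRow
  simp only [List.drop_one, List.tail_cons]
  rw [foldl_rev_eq_dec]
  simp

theorem prod_nonneg_of_mem (ts : List Int) (h : ∀ t ∈ ts, 0 ≤ t) : 0 ≤ ts.prod := by
  induction ts with
  | nil => simp
  | cons t rest ih =>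
    simp only [List.prod_cons]
    exact mul_nonneg (h t (by simp)) (ih (fun x hx => h x (by simp [hx])))

-- mixed-radix shift: dec ts (x * prod ts + j) = (x, digits of j)
theorem dec_shift (ts : List Int) (h : ∀ t ∈ ts, 0 ≤ t) :
    ∀ x j : Int, 0 ≤ j → j < ts.prod →
      dec ts (x * ts.prod + j) = (x, (dec ts j).2) := by
  induction ts with
  | nil =>
    intro x j hj hjlt
    simp only [List.prod_nil] at hjlt
    have : j = 0 := by omega
    subst this
    simp [dec]
  | cons t rest ih =>
    intro x j hj hjlt
    have ht : 0 ≤ t := h t (by simp)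
    have hrest : ∀ u ∈ rest, 0 ≤ u := fun u hu => h u (by simp [hu])
    have hM : 0 ≤ rest.prod := prod_nonneg_of_mem rest hrest
    simp only [List.prod_cons] at hjlt
    have hpos : 0 < t * rest.prod := lt_of_le_of_lt hj hjlt
    have hMpos : 0 < rest.prod := by nlinarith
    have htpos : 0 < t := by nlinarith
    have hb0 : 0 ≤ j % rest.prod := Int.emod_nonneg j (ne_of_gt hMpos)
    have hbM : j % rest.prod < rest.prod := Int.emod_lt_of_pos j hMpos
    have hj_eq : j = rest.prod * (j / rest.prod) + j % rest.prod :=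
      (Int.ediv_add_emod j rest.prod).symm
    have ha0 : 0 ≤ j / rest.prod := Int.ediv_nonneg hj hM
    have hat : j / rest.prod < t := by nlinarith [hj_eq]
    have e1 : x * (t * rest.prod) + j
        = (x * t + j / rest.prod) * rest.prod + j % rest.prod := by
      linear_combination hj_eq
    have e2 : dec rest ((x * t + j / rest.prod) * rest.prod + j % rest.prod)
        = (x * t + j / rest.prod, (dec rest (j % rest.prod)).2) :=
      ih hrest (x * t + j / rest.prod) (j % rest.prod) hb0 hbM
    have e3 : dec rest j = (j / rest.prod, (dec rest (j % rest.prod)).2) := by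
      conv_lhs => rw [hj_eq, mul_comm rest.prod (j / rest.prod)]
      exact ih hrest (j / rest.prod) (j % rest.prod) hb0 hbM
    have hfd : PySem.Int.floordiv (x * t + j / rest.prod) t = x := by
      rw [PySem.Int.floordiv_eq_iff_of_pos htpos]
      constructor <;> nlinarith
    have hmd : PySem.Int.mod (x * t + j / rest.prod) t = j / rest.prod := by
      have := PySem.Int.floordiv_mul_add_mod (x * t + j / rest.prod) t
      rw [hfd] at this; omega
    have hma : PySem.Int.mod (j / rest.prod) t = j / rest.prod := by
      rw [PySem.Int.mod_eq_emod_of_pos htpos]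
      exact Int.emod_eq_of_lt ha0 hat
    simp only [dec, List.prod_cons, e1, e2, e3, hfd, hmd, hma]

-- range splitting: [0, t*M) = blocks of length M
theorem pyRange_shift (c M : Int) (_hM : 0 ≤ M) :
    PySem.List.pyRange c (c + M) 1 = (PySem.List.pyRange 0 M 1).map (fun j => c + j) := by
  simp [PySem.List.pyRange_one, List.map_map, Function.comp_def]

theorem pyRange_mul_split (t M : Int) (ht : 0 ≤ t) (hM : 0 ≤ M) :
    PySem.List.pyRange 0 (t * M) 1
      = (PySem.List.pyRange 0 t 1).flatMap
          (fun x => (PySem.List.pyRange 0 M 1).map (fun j => x * M + j)) := by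
  obtain ⟨n, rfl⟩ : ∃ n : ℕ, t = (n : Int) := ⟨t.toNat, (Int.toNat_of_nonneg ht).symm⟩
  induction n with
  | zero => simp [PySem.List.pyRange_one_eq_nil]
  | succ n ihn =>
    have hn : (0 : Int) ≤ (n : Int) := by positivity
    push_cast
    rw [show ((n : Int) + 1) * M = (n : Int) * M + M by ring,
        PySem.List.pyRange_one_append (a := 0) (m := (n : Int) * M)
          (b := (n : Int) * M + M) (by positivity) (by linarith),
        PySem.List.pyRange_one_succ_right (a := 0) (b := (n : Int)) hn,
        List.flatMap_append, ihn hn]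
    simp [pyRange_shift ((n : Int) * M) M hM]

theorem pyProduct_eq_dec (ts : List Int) (h : ∀ t ∈ ts, 0 ≤ t) :
    pyProduct (ts.map (fun t => PySem.List.pyRange 0 t 1))
      = (PySem.List.pyRange 0 ts.prod 1).map (fun j => (dec ts j).2) := by
  induction ts with
  | nil =>
    have h1 : PySem.List.pyRange (0 : Int) 1 1 = [0] := by decide
    simp [pyProduct, dec, h1]
  | cons t rest ih =>
    have ht : 0 ≤ t := h t (by simp)
    have hrest : ∀ u ∈ rest, 0 ≤ u := fun u hu => h u (by simp [hu])
    have hM : 0 ≤ rest.prod := prod_nonneg_of_mem rest hrest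
    simp only [List.map_cons, pyProduct, List.prod_cons]
    rw [pyRange_mul_split t rest.prod ht hM, ih hrest, List.map_flatMap]
    apply List.flatMap_congr
    intro x hx
    rw [PySem.List.mem_pyRange_one] at hx
    rw [List.map_map, List.map_map]
    apply List.map_congr_left
    intro j hj
    rw [PySem.List.mem_pyRange_one] at hj
    have hd := dec_shift rest hrest x j hj.1 hj.2
    have hmx : PySem.Int.mod x t = x := by
      have htpos : 0 < t := lt_of_le_of_lt hx.1 hx.2
      rw [PySem.Int.mod_eq_emod_of_pos htpos]
      exact Int.emod_eq_of_lt hx.1 hx.2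
    simp [dec, hd, hmx]

theorem foldl_snoc_eq_map (l : List (List Int)) (acc : List (List Int)) :
    l.foldl (fun Temp i => Temp ++ [i ++ [0]]) acc = acc ++ l.map (fun i => i ++ [0]) := by
  induction l generalizing acc with
  | nil => simp
  | cons i l ih => simp [ih]

theorem pyRange_zero_max (u : Int) :
    PySem.List.pyRange 0 u 1 = PySem.List.pyRange 0 (max 0 u) 1 := by
  by_cases h : u ≤ 0
  · rw [PySem.List.pyRange_one_eq_nil h, PySem.List.pyRange_one_eq_nil (by omega)]
  · rw [max_eq_right (by omega)]

theorem head_range_eq (c u : Int) :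
    PySem.List.pyRange c u 1 = (PySem.List.pyRange 0 (max 0 (u - c)) 1).map (fun x => c + x) := by
  by_cases h : u ≤ c
  · rw [PySem.List.pyRange_one_eq_nil h, PySem.List.pyRange_one_eq_nil (by omega)]
    simp
  · have h0 : max 0 (u - c) = u - c := by omega
    rw [h0]
    conv_lhs => rw [show u = c + (u - c) by ring, pyRange_shift c (u - c) (by omega)]

-- the two enumerations agree once the first range is shifted to start at 0
theorem main_decode (s0 : Int) (ts : List Int) (hs0 : 0 ≤ s0)
    (hts : ∀ t ∈ ts, 0 ≤ t) (c : Int) :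
    (pyProduct (((PySem.List.pyRange 0 s0 1).map (fun x => c + x))
        :: ts.map (fun t => PySem.List.pyRange 0 t 1))).map (· ++ [0])
      = (PySem.List.pyRange 0 ((s0 :: ts).foldl (· * ·) 1) 1).map
          (fun j => decodeRow j (s0 :: ts) c) := by
  have hM : 0 ≤ ts.prod := prod_nonneg_of_mem ts hts
  have hfold : (s0 :: ts).foldl (· * ·) 1 = s0 * ts.prod := by
    rw [← List.prod_eq_foldl]; simp
  rw [hfold, pyRange_mul_split s0 ts.prod hs0 hM]
  simp only [pyProduct, pyProduct_eq_dec ts hts, List.map_flatMap, List.flatMap_map,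
    List.map_map]
  apply List.flatMap_congr
  intro x hx
  rw [PySem.List.mem_pyRange_one] at hx
  apply List.map_congr_left
  intro j hj
  rw [PySem.List.mem_pyRange_one] at hj
  simp only [Function.comp_def, decodeRow_eq, dec_shift ts hts x j hj.1 hj.2]
  simp [add_comm]

-- ===== VERDICT (by name: the statement is the Claim_ definition above) =====
theorem NewCreateStates_spec : Claim_equal_NewCreateStates := by
  intro LT_f LT_s Inv_Max Inv_Min O_f O_s _
  unfold Spec_NewCreateStates NewCreateStates NewCreateStates_alt mkTotalPipe
  rw [foldl_snoc_eq_map, List.nil_append]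
  have hts : ∀ t ∈ (List.replicate (max 0 LT_f).toNat (max 0 (O_f + O_s + 1))
      ++ List.replicate (max 0 (LT_s - LT_f - 1)).toNat (max 0 (O_s + 1))), 0 ≤ t := by
    intro t ht
    rcases List.mem_append.mp ht with h' | h' <;>
      simp [List.eq_of_mem_replicate h']
  have htail : (PySem.List.pyRange 1 (LT_f + 1) 1).map
        (fun _ => PySem.List.pyRange 0 (O_f + O_s + 1) 1)
      ++ (PySem.List.pyRange (LT_f + 1) LT_s 1).map
        (fun _ => PySem.List.pyRange 0 (O_s + 1) 1)
      = (List.replicate (max 0 LT_f).toNat (max 0 (O_f + O_s + 1))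
        ++ List.replicate (max 0 (LT_s - LT_f - 1)).toNat (max 0 (O_s + 1))).map
          (fun t => PySem.List.pyRange 0 t 1) := by
    rw [List.map_append, List.map_replicate, List.map_replicate,
      List.map_const', List.map_const', PySem.List.length_pyRange_one,
      PySem.List.length_pyRange_one, ← pyRange_zero_max, ← pyRange_zero_max]
    congr 2 <;> omega
  have hhead : PySem.List.pyRange Inv_Min (Inv_Max + 1) 1
      = (PySem.List.pyRange 0 (max 0 (Inv_Max + 1 - Inv_Min)) 1).map (fun x => Inv_Min + x) := by
    exact head_range_eq Inv_Min (Inv_Max + 1)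
  rw [List.append_assoc, List.singleton_append, hhead, htail]
  exact main_decode (max 0 (Inv_Max + 1 - Inv_Min)) _ (by omega) hts Inv_Min
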